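-- pv_equiv track=rewrite | github.com/HNovais/PL | src/yacc.py | is_dotted_key
-- ===== SOURCE A (Python) =====
-- def is_dotted_key(key):
--     quotes = False
--
--     for char in key:
--         if char == '"':
--             quotes = not quotes
--         elif char == "." and not quotes:
--             return True
--     return False
-- ===== SOURCE B (Python) =====
-- def is_dotted_key(key):
--     return any(c == '.' and key[:i].count('"') % 2 == 0
--                for i, c in enumerate(key))
-- ===== Notes on version B (the rewrite author's own statement) =====
-- stated objective: alternative
-- what changed: Replaces the stateful quote-toggling scan with a declarative any() over enumerate(key) that judges each dot by the parity of the quote count in the prefix before it.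
import Mathlib
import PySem

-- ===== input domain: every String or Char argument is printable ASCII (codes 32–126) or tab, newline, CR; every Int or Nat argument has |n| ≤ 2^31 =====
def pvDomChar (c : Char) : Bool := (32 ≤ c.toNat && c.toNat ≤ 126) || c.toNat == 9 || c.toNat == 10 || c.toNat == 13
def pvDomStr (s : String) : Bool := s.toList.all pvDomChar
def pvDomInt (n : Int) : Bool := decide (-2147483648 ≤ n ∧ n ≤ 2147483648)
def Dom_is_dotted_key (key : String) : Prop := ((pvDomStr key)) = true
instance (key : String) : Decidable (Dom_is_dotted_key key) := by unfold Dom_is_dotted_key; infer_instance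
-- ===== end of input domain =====

-- B replaces A's stateful quote-toggling scan with a declarative any() over enumerate(key)
-- judging each dot by the parity of the quote count in the prefix before it (objective: alternative).

-- ===== PORT A =====
-- A's for-loop with the 'quotes' flag and early 'return True', as structural recursion.
def isDottedLoop : List Char → Bool → Bool
  | [], _ => false
  | c :: cs, quotes =>
    if c == '"' then isDottedLoop cs (!quotes)
    else if c == '.' && !quotes then true
    else isDottedLoop cs quotes

def is_dotted_key (key : String) : Bool := isDottedLoop key.toList false

-- ===== PORT B =====
-- any(c == '.' and key[:i].count('"') % 2 == 0 for i, c in enumerate(key)).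
-- key[:i].count('"') is a Nat; Nat % equals Python % on nonnegative ints, so '% 2 == 0' is exact.
def is_dotted_key_alt (key : String) : Bool :=
  (PySem.List.enumerate key.toList 0).any fun p =>
    p.2 == '.' && PySem.Chars.count (PySem.List.slice key.toList none (some p.1)) ['"'] % 2 == 0

-- ===== PRECONDITION & SPEC =====
def Spec_is_dotted_key (key : String) (out : Bool) : Prop := out = is_dotted_key_alt key
instance (key : String) (out : Bool) : Decidable (Spec_is_dotted_key key out) := by unfold Spec_is_dotted_key; infer_instance

-- ===== CLAIM (what is proved, stated in full; the proofs are below) =====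
def Claim_equal_is_dotted_key : Prop := ∀ (key : String), Dom_is_dotted_key key → Spec_is_dotted_key key (is_dotted_key key)

-- ===== LEMMAS AND PROOFS =====

-- Counting the substring '"' is counting the character '"'.
lemma countGo_quote (t : List Char) : ∀ (fuel acc : Nat), t.length ≤ fuel →
    PySem.Chars.count.go ['"'] fuel t acc = acc + t.count '"' := by
  induction t with
  | nil => intro fuel acc _; cases fuel <;> simp [PySem.Chars.count.go]
  | cons c cs ih =>
    intro fuel acc h
    cases fuel with
    | zero => simp at h
    | succ f =>
      simp only [PySem.Chars.count.go, List.isPrefixOf, Bool.and_true, List.drop_succ_cons,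
        List.drop_zero, List.length_singleton]
      by_cases hc : ('"' : Char) = c
      · simp [ih f (acc + 1) (by simpa using h), ← hc]
        omega
      · have hbe : (('"' : Char) == c) = false := by simp [hc]
        have hbe' : (c == ('"' : Char)) = false := by
          simp; exact fun h' => hc h'.symm
        simp [hbe, hbe', ih f acc (by simpa using h), List.count_cons]

lemma count_quote (s : List Char) : PySem.Chars.count s ['"'] = s.count '"' := by
  simpa [PySem.Chars.count] using countGo_quote s s.length 0 le_rfl

lemma parity_toggle (n : Nat) : (!decide (n % 2 = 1)) = decide ((n + 1) % 2 = 1) := by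
  rcases Nat.mod_two_eq_zero_or_one n with h | h <;> simp [h, Nat.add_mod]

-- Main invariant: A's flag at position pre.length is the quote-count parity of pre.
lemma loop_eq_any (cs : List Char) : ∀ (pre : List Char),
    isDottedLoop cs (decide (pre.count '"' % 2 = 1)) =
      ((PySem.List.enumerate cs ((pre.length : Nat) : Int)).any fun p =>
        p.2 == '.' && PySem.Chars.count (PySem.List.slice (pre ++ cs) none (some p.1)) ['"'] % 2 == 0) := by
  induction cs with
  | nil => intro pre; simp [isDottedLoop, PySem.List.enumerate_nil]
  | cons c cs ih =>
    intro pre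
    rw [PySem.List.enumerate_cons, List.any_cons]
    have hslice : PySem.List.slice (pre ++ c :: cs) none (some ((pre.length : Nat) : Int)) = pre := by
      rw [PySem.List.slice_to_natCast]
      exact List.take_left
    have hrest : ((PySem.List.enumerate cs (((pre.length : Nat) : Int) + 1)).any fun p =>
        p.2 == '.' && PySem.Chars.count (PySem.List.slice (pre ++ c :: cs) none (some p.1)) ['"'] % 2 == 0)
        = isDottedLoop cs (decide ((pre ++ [c]).count '"' % 2 = 1)) := by
      have := (ih (pre ++ [c])).symm
      simpa [List.append_assoc] using this
    rw [hslice, hrest, count_quote]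
    by_cases hc : c = '"'
    · subst hc
      have hnotdot : (('"' : Char) == '.') = false := by decide
      have hcnt : (pre ++ ['"']).count '"' = pre.count '"' + 1 := by
        simp [List.count_append]
      simp only [isDottedLoop, hnotdot, Bool.false_and, Bool.false_or,
        if_pos (by decide : (('"' : Char) == '"') = true), hcnt, parity_toggle]
    · have hq : (c == '"') = false := by simp [hc]
      have hcnt : (pre ++ [c]).count '"' = pre.count '"' := by
        simp [List.count_append, hc]
      rw [hcnt]
      simp only [isDottedLoop, hq, Bool.false_eq_true, if_false]
      by_cases hd : c = '.'
      · subst hd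
        by_cases hp : pre.count '"' % 2 = 1
        · have hp0 : (pre.count '"' % 2 == 0) = false := by simp; omega
          simp [hp]
        · have hp0 : pre.count '"' % 2 = 0 := by omega
          simp [hp0]
      · simp [hd]

-- ===== VERDICT (by name: the statement is the Claim_ definition above) =====
theorem is_dotted_key_spec : Claim_equal_is_dotted_key := by
  intro key _
  unfold Spec_is_dotted_key is_dotted_key is_dotted_key_alt
  have := loop_eq_any key.toList []
  simpa using this
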